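-- pv_equiv track=rewrite | github.com/monaal10/Oncall-AI-agent | oncall_agent/integrations/registry.py | _select_llm_provider
-- ===== SOURCE A (Python) =====
-- from typing import Dict, List, Optional, Any, Set
--
-- def _select_llm_provider(options: List[str], preferences: Dict[str, Any]) -> str:
--     """Select the best LLM provider based on options and preferences."""
--     if not options:
--         raise ValueError("No LLM providers available")
--
--     # Check user preference
--     preferred_llm = preferences.get("preferred_llm_provider")
--     if preferred_llm in options:
--         return preferred_llm
--
--     # Default priority: OpenAI > Anthropic > Azure OpenAI > Gemini > Bedrock > Ollama > HuggingFace
--     priority_order = ["openai", "anthropic", "azure_openai", "gemini", "bedrock", "ollama", "huggingface"]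
--     for provider in priority_order:
--         if provider in options:
--             return provider
--
--     return options[0]
-- ===== SOURCE B (Python) =====
-- _RANK = {p: i for i, p in enumerate(
--     ["openai", "anthropic", "azure_openai", "gemini", "bedrock", "ollama", "huggingface"])}
--
-- def _select_llm_provider(options, preferences):
--     """Select the best LLM provider based on options and preferences."""
--     if not options:
--         raise ValueError("No LLM providers available")
--
--     preferred_llm = preferences.get("preferred_llm_provider")
--     if preferred_llm in options:
--         return preferred_llm
--
--     # filter options down to providers with a known priority, then pick the
--     # minimum-rank one; ranks are unique so min is unambiguous
--     known = [o for o in options if o in _RANK]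
--     if known:
--         return min(known, key=_RANK.get)
--     return options[0]
-- ===== Notes on version B (the rewrite author's own statement) =====
-- stated objective: alternative
-- what changed: Instead of scanning the fixed priority list testing membership in options per entry, B filters options down to those with a known rank (precomputed name-to-rank table) and returns min(known, key=rank); ranks are unique so the minimum is unambiguous.
import Mathlib
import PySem

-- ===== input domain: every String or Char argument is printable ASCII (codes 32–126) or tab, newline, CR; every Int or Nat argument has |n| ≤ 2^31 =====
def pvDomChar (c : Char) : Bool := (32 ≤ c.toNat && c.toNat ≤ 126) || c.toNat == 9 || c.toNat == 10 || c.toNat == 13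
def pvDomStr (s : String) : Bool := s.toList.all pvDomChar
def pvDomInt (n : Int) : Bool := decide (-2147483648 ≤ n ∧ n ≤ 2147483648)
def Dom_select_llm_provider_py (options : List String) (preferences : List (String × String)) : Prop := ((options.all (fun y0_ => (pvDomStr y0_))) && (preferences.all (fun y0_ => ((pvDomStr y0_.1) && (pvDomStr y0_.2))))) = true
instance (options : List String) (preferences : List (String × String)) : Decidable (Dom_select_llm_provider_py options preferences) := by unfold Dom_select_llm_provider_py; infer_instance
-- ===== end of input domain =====

-- B replaces A's scan of the fixed priority list by filtering options to those with a
-- known rank and taking min by a precomputed name→rank table (alternative decomposition,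
-- same cost class); A raises ValueError on empty options, excluded by Pre_.


-- ===== PORT A =====
-- the fixed priority list of A
def pvPriorityA : List String :=
  ["openai", "anthropic", "azure_openai", "gemini", "bedrock", "ollama", "huggingface"]

-- A's for-loop: first provider of the priority list that is in options
def pvScanA (ps : List String) (options : List String) : Option String :=
  match ps with
  | [] => none
  | p :: rest => if p ∈ options then some p else pvScanA rest options

def select_llm_provider_py (options : List String) (preferences : List (String × String)) : String :=
  if options = [] then ""   -- A raises ValueError here; excluded by Pre_
  else
    let step :=
      match pvScanA pvPriorityA options with
      | some p => p
      | none => options.headD ""   -- options[0]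
    match (PySem.Dict.ofList preferences).get? "preferred_llm_provider" with
    | some p => if p ∈ options then p else step
    | none => step

-- ===== PORT B =====
-- B's rank table {p: i for i, p in enumerate(priority)}
def pvRankB : PySem.Dict String Int :=
  (PySem.List.enumerate
    ["openai", "anthropic", "azure_openai", "gemini", "bedrock", "ollama", "huggingface"] 0).foldl
    (fun d ip => d.insert ip.2 ip.1) PySem.Dict.empty

-- B's tail: known = [o for o in options if o in _RANK]; min(known, key=_RANK.get) if known else options[0]
-- (min? = none exactly when known = [], which is Python's 'if known' branch)
def pvTailB (options : List String) : String :=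
  match PySem.List.min? (options.filter (fun o => (pvRankB.get? o).isSome))
        (fun o => (pvRankB.get? o).getD 0) with
  | some m => m
  | none => options.headD ""   -- options[0]

def select_llm_provider_py_alt (options : List String) (preferences : List (String × String)) : String :=
  if options = [] then ""   -- B raises ValueError here; excluded by Pre_
  else
    match (PySem.Dict.ofList preferences).get? "preferred_llm_provider" with
    | some p => if p ∈ options then p else pvTailB options
    | none => pvTailB options

-- ===== PRECONDITION & SPEC =====
-- A (and B) raise ValueError on an empty options list; only that input is excluded.
def Pre_select_llm_provider_py (options : List String) (preferences : List (String × String)) : Prop :=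
  options ≠ []
instance (options : List String) (preferences : List (String × String)) : Decidable (Pre_select_llm_provider_py options preferences) := by unfold Pre_select_llm_provider_py; infer_instance

def pvWitness_select_llm_provider_py : List String × (List (String × String)) :=
  (["gemini", "ollama"], [("preferred_llm_provider", "ollama")])

def Spec_select_llm_provider_py (options : List String) (preferences : List (String × String)) (out : String) : Prop := out = select_llm_provider_py_alt options preferences
instance (options : List String) (preferences : List (String × String)) (out : String) : Decidable (Spec_select_llm_provider_py options preferences out) := by unfold Spec_select_llm_provider_py; infer_instance

-- ===== CLAIM (what is proved, stated in full; the proofs are below) =====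
def Claim_equal_select_llm_provider_py : Prop := ∀ (options : List String) (preferences : List (String × String)), Dom_select_llm_provider_py options preferences → Pre_select_llm_provider_py options preferences → Spec_select_llm_provider_py options preferences (select_llm_provider_py options preferences)

-- ===== LEMMAS AND PROOFS =====

-- the rank table as an if-chain
lemma pvRank_get (o : String) :
    pvRankB.get? o =
      if o = "openai" then some 0
      else if o = "anthropic" then some 1
      else if o = "azure_openai" then some 2
      else if o = "gemini" then some 3
      else if o = "bedrock" then some 4
      else if o = "ollama" then some 5
      else if o = "huggingface" then some 6
      else none := by
  have h : pvRankB = PySem.Dict.mk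
      [("openai", 0), ("anthropic", 1), ("azure_openai", 2), ("gemini", 3),
       ("bedrock", 4), ("ollama", 5), ("huggingface", 6)] := by rfl
  by_cases h0 : o = "openai"
  · subst h0; decide
  by_cases h1 : o = "anthropic"
  · subst h1; decide
  by_cases h2 : o = "azure_openai"
  · subst h2; decide
  by_cases h3 : o = "gemini"
  · subst h3; decide
  by_cases h4 : o = "bedrock"
  · subst h4; decide
  by_cases h5 : o = "ollama"
  · subst h5; decide
  by_cases h6 : o = "huggingface"
  · subst h6; decide
  rw [if_neg h0, if_neg h1, if_neg h2, if_neg h3, if_neg h4, if_neg h5, if_neg h6]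
  simp only [h, PySem.Dict.get?_mk_cons, beq_iff_eq]
  rw [if_neg (Ne.symm h0), if_neg (Ne.symm h1), if_neg (Ne.symm h2), if_neg (Ne.symm h3),
      if_neg (Ne.symm h4), if_neg (Ne.symm h5), if_neg (Ne.symm h6)]
  rfl

-- a name with a rank is one of the seven priority names
lemma pvRank_isSome_cases (o : String) (h : (pvRankB.get? o).isSome = true) :
    o = "openai" ∨ o = "anthropic" ∨ o = "azure_openai" ∨ o = "gemini" ∨
    o = "bedrock" ∨ o = "ollama" ∨ o = "huggingface" := by
  rw [pvRank_get] at h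
  split_ifs at h <;> simp_all

-- the first priority name present in opts (closed form of both tails' selection)
def pvExpected (opts : List String) : Option String :=
  if "openai" ∈ opts then some "openai"
  else if "anthropic" ∈ opts then some "anthropic"
  else if "azure_openai" ∈ opts then some "azure_openai"
  else if "gemini" ∈ opts then some "gemini"
  else if "bedrock" ∈ opts then some "bedrock"
  else if "ollama" ∈ opts then some "ollama"
  else if "huggingface" ∈ opts then some "huggingface"
  else none

lemma pvScanA_eq_expected (opts : List String) :
    pvScanA pvPriorityA opts = pvExpected opts := by
  unfold pvPriorityA pvExpected
  simp only [pvScanA]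

lemma pvMin_eq_expected (opts : List String) :
    PySem.List.min? (opts.filter (fun o => (pvRankB.get? o).isSome))
      (fun o => (pvRankB.get? o).getD 0) = pvExpected opts := by
  unfold pvExpected
  split_ifs with h0 h1 h2 h3 h4 h5 h6
  · -- "openai" is the first priority name present
    have hk : "openai" ∈ opts.filter (fun o => (pvRankB.get? o).isSome) :=
      List.mem_filter.mpr ⟨h0, by decide⟩
    cases hmin : PySem.List.min? (opts.filter (fun o => (pvRankB.get? o).isSome))
        (fun o => (pvRankB.get? o).getD 0) with
    | none =>
      rw [PySem.List.min?_eq_none_iff] at hmin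
      simp [hmin] at hk
    | some m =>
      have hle := PySem.List.min?_isMin hmin _ hk
      obtain ⟨hmo, hms⟩ := List.mem_filter.mp (PySem.List.min?_mem hmin)
      rcases pvRank_isSome_cases m hms with rfl|rfl|rfl|rfl|rfl|rfl|rfl
      · rfl
      · exact absurd hle (by decide)
      · exact absurd hle (by decide)
      · exact absurd hle (by decide)
      · exact absurd hle (by decide)
      · exact absurd hle (by decide)
      · exact absurd hle (by decide)
  · -- "anthropic" is the first priority name present
    have hk : "anthropic" ∈ opts.filter (fun o => (pvRankB.get? o).isSome) :=
      List.mem_filter.mpr ⟨h1, by decide⟩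
    cases hmin : PySem.List.min? (opts.filter (fun o => (pvRankB.get? o).isSome))
        (fun o => (pvRankB.get? o).getD 0) with
    | none =>
      rw [PySem.List.min?_eq_none_iff] at hmin
      simp [hmin] at hk
    | some m =>
      have hle := PySem.List.min?_isMin hmin _ hk
      obtain ⟨hmo, hms⟩ := List.mem_filter.mp (PySem.List.min?_mem hmin)
      rcases pvRank_isSome_cases m hms with rfl|rfl|rfl|rfl|rfl|rfl|rfl
      · exact absurd hmo h0
      · rfl
      · exact absurd hle (by decide)
      · exact absurd hle (by decide)
      · exact absurd hle (by decide)
      · exact absurd hle (by decide)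
      · exact absurd hle (by decide)
  · -- "azure_openai" is the first priority name present
    have hk : "azure_openai" ∈ opts.filter (fun o => (pvRankB.get? o).isSome) :=
      List.mem_filter.mpr ⟨h2, by decide⟩
    cases hmin : PySem.List.min? (opts.filter (fun o => (pvRankB.get? o).isSome))
        (fun o => (pvRankB.get? o).getD 0) with
    | none =>
      rw [PySem.List.min?_eq_none_iff] at hmin
      simp [hmin] at hk
    | some m =>
      have hle := PySem.List.min?_isMin hmin _ hk
      obtain ⟨hmo, hms⟩ := List.mem_filter.mp (PySem.List.min?_mem hmin)
      rcases pvRank_isSome_cases m hms with rfl|rfl|rfl|rfl|rfl|rfl|rfl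
      · exact absurd hmo h0
      · exact absurd hmo h1
      · rfl
      · exact absurd hle (by decide)
      · exact absurd hle (by decide)
      · exact absurd hle (by decide)
      · exact absurd hle (by decide)
  · -- "gemini" is the first priority name present
    have hk : "gemini" ∈ opts.filter (fun o => (pvRankB.get? o).isSome) :=
      List.mem_filter.mpr ⟨h3, by decide⟩
    cases hmin : PySem.List.min? (opts.filter (fun o => (pvRankB.get? o).isSome))
        (fun o => (pvRankB.get? o).getD 0) with
    | none =>
      rw [PySem.List.min?_eq_none_iff] at hmin
      simp [hmin] at hk
    | some m =>
      have hle := PySem.List.min?_isMin hmin _ hk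
      obtain ⟨hmo, hms⟩ := List.mem_filter.mp (PySem.List.min?_mem hmin)
      rcases pvRank_isSome_cases m hms with rfl|rfl|rfl|rfl|rfl|rfl|rfl
      · exact absurd hmo h0
      · exact absurd hmo h1
      · exact absurd hmo h2
      · rfl
      · exact absurd hle (by decide)
      · exact absurd hle (by decide)
      · exact absurd hle (by decide)
  · -- "bedrock" is the first priority name present
    have hk : "bedrock" ∈ opts.filter (fun o => (pvRankB.get? o).isSome) :=
      List.mem_filter.mpr ⟨h4, by decide⟩
    cases hmin : PySem.List.min? (opts.filter (fun o => (pvRankB.get? o).isSome))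
        (fun o => (pvRankB.get? o).getD 0) with
    | none =>
      rw [PySem.List.min?_eq_none_iff] at hmin
      simp [hmin] at hk
    | some m =>
      have hle := PySem.List.min?_isMin hmin _ hk
      obtain ⟨hmo, hms⟩ := List.mem_filter.mp (PySem.List.min?_mem hmin)
      rcases pvRank_isSome_cases m hms with rfl|rfl|rfl|rfl|rfl|rfl|rfl
      · exact absurd hmo h0
      · exact absurd hmo h1
      · exact absurd hmo h2
      · exact absurd hmo h3
      · rfl
      · exact absurd hle (by decide)
      · exact absurd hle (by decide)
  · -- "ollama" is the first priority name present
    have hk : "ollama" ∈ opts.filter (fun o => (pvRankB.get? o).isSome) :=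
      List.mem_filter.mpr ⟨h5, by decide⟩
    cases hmin : PySem.List.min? (opts.filter (fun o => (pvRankB.get? o).isSome))
        (fun o => (pvRankB.get? o).getD 0) with
    | none =>
      rw [PySem.List.min?_eq_none_iff] at hmin
      simp [hmin] at hk
    | some m =>
      have hle := PySem.List.min?_isMin hmin _ hk
      obtain ⟨hmo, hms⟩ := List.mem_filter.mp (PySem.List.min?_mem hmin)
      rcases pvRank_isSome_cases m hms with rfl|rfl|rfl|rfl|rfl|rfl|rfl
      · exact absurd hmo h0
      · exact absurd hmo h1
      · exact absurd hmo h2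
      · exact absurd hmo h3
      · exact absurd hmo h4
      · rfl
      · exact absurd hle (by decide)
  · -- "huggingface" is the first priority name present
    have hk : "huggingface" ∈ opts.filter (fun o => (pvRankB.get? o).isSome) :=
      List.mem_filter.mpr ⟨h6, by decide⟩
    cases hmin : PySem.List.min? (opts.filter (fun o => (pvRankB.get? o).isSome))
        (fun o => (pvRankB.get? o).getD 0) with
    | none =>
      rw [PySem.List.min?_eq_none_iff] at hmin
      simp [hmin] at hk
    | some m =>
      have hle := PySem.List.min?_isMin hmin _ hk
      obtain ⟨hmo, hms⟩ := List.mem_filter.mp (PySem.List.min?_mem hmin)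
      rcases pvRank_isSome_cases m hms with rfl|rfl|rfl|rfl|rfl|rfl|rfl
      · exact absurd hmo h0
      · exact absurd hmo h1
      · exact absurd hmo h2
      · exact absurd hmo h3
      · exact absurd hmo h4
      · exact absurd hmo h5
      · rfl
  · -- no priority name present: known is empty
    have hnil : opts.filter (fun o => (pvRankB.get? o).isSome) = [] := by
      rw [List.filter_eq_nil_iff]
      intro a ha hs
      rcases pvRank_isSome_cases a hs with rfl|rfl|rfl|rfl|rfl|rfl|rfl
      · exact h0 ha
      · exact h1 ha
      · exact h2 ha
      · exact h3 ha
      · exact h4 ha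
      · exact h5 ha
      · exact h6 ha
    rw [hnil]
    rfl

lemma pvTail_eq (opts : List String) :
    pvTailB opts =
    (match pvScanA pvPriorityA opts with
     | some p => p
     | none => opts.headD "") := by
  unfold pvTailB
  rw [pvMin_eq_expected, pvScanA_eq_expected]

-- ===== VERDICT (by name: the statement is the Claim_ definition above) =====
theorem select_llm_provider_py_spec : Claim_equal_select_llm_provider_py := by
  intro options preferences _ hpre
  unfold Spec_select_llm_provider_py select_llm_provider_py select_llm_provider_py_alt
  simp only [if_neg hpre]
  rw [pvTail_eq]
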